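-- pv_equiv track=rewrite | github.com/JoseCerezo90/TFM-Construccion-evolutiva-de-redes-de-neuronas-con-entrenamiento-parcial | Ejecuciones_1_preliminares/California/Asíncrono/Asincrono_TFM_California.py | __get_topology
-- ===== SOURCE A (Python) =====
-- def __get_topology(encoded_network):
--     topology = []
--     num_neurons = 0
--     for i in range(len(encoded_network)):
--         if encoded_network[i] == '1':
--             num_neurons += 1
--         elif encoded_network[i] == '0':
--             topology.append(num_neurons)
--             num_neurons = 0
--     topology.append(num_neurons)
--     return topology
-- ===== SOURCE B (Python) =====
-- def __get_topology(encoded_network):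
--     return [seg.count('1') for seg in encoded_network.split('0')]
-- ===== Notes on version B (the rewrite author's own statement) =====
-- stated objective: faster
-- what changed: Replaced the char-by-char state-machine loop (running neuron counter flushed on each '0') with a split on the '0' separator followed by counting '1' characters in each segment.
import Mathlib
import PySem

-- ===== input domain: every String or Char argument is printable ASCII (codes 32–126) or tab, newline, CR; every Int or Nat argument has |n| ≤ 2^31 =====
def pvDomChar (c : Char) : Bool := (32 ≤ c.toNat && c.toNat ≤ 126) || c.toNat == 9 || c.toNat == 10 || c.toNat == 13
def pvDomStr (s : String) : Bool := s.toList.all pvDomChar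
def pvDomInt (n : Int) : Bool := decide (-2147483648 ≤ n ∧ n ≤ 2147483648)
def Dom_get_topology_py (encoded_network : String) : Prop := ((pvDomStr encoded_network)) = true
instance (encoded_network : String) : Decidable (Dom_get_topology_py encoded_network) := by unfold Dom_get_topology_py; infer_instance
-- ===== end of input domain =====

-- B replaces A's char-by-char counter loop by split-on-'0' + per-segment count of '1' (idiomatic).

-- ===== PORT A =====
-- A: loop over the characters, incrementing a counter on '1', flushing it on '0'.
def get_topology_py (encoded_network : String) : List Int :=
  let st := encoded_network.toList.foldl
    (fun (p : List Int × Int) c =>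
      if c = '1' then (p.1, p.2 + 1)
      else if c = '0' then (p.1 ++ [p.2], 0)
      else p)
    ([], 0)
  st.1 ++ [st.2]

-- ===== PORT B =====
-- B: [seg.count('1') for seg in encoded_network.split('0')]
def get_topology_py_alt (encoded_network : String) : List Int :=
  (PySem.Chars.splitOn encoded_network.toList "0".toList).map
    (fun seg => (PySem.Chars.count seg "1".toList : Int))

-- ===== PRECONDITION & SPEC =====
def Spec_get_topology_py (encoded_network : String) (out : List Int) : Prop := out = get_topology_py_alt encoded_network
instance (encoded_network : String) (out : List Int) : Decidable (Spec_get_topology_py encoded_network out) := by unfold Spec_get_topology_py; infer_instance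

-- ===== CLAIM (what is proved, stated in full; the proofs are below) =====
def Claim_equal_get_topology_py : Prop := ∀ (encoded_network : String), Dom_get_topology_py encoded_network → Spec_get_topology_py encoded_network (get_topology_py encoded_network)

-- ===== LEMMAS AND PROOFS =====

-- reference spec: forward recursion with the running counter
def pvGo : List Char → Int → List Int
  | [], n => [n]
  | c :: cs, n =>
      if c = '1' then pvGo cs (n + 1)
      else if c = '0' then n :: pvGo cs 0
      else pvGo cs n

-- simple recursive split on a single '0' separator, carried prefix
def pvSplit1 : List Char → List Char → List (List Char)
  | pre, [] => [pre]
  | pre, c :: cs =>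
      if c = '0' then pre :: pvSplit1 [] cs
      else pvSplit1 (pre ++ [c]) cs

lemma pvGo_ne_nil (cs : List Char) (n : Int) : pvGo cs n ≠ [] := by
  induction cs generalizing n with
  | nil => simp [pvGo]
  | cons c cs ih => simp only [pvGo]; split_ifs <;> simp [ih]

lemma pvLoopA_eq (cs : List Char) (topo : List Int) (n : Int) :
    cs.foldl
      (fun (p : List Int × Int) c =>
        if c = '1' then (p.1, p.2 + 1)
        else if c = '0' then (p.1 ++ [p.2], 0)
        else p)
      (topo, n)
    = (topo ++ (pvGo cs n).dropLast, (pvGo cs n).getLast (pvGo_ne_nil cs n)) := by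
  induction cs generalizing topo n with
  | nil => simp [pvGo]
  | cons c cs ih =>
      by_cases h1 : c = '1'
      · simp [pvGo, h1, List.foldl_cons, ih]
      · by_cases h0 : c = '0'
        · have hne : pvGo cs 0 ≠ [] := pvGo_ne_nil cs 0
          cases hpg : pvGo cs 0 with
          | nil => exact absurd hpg hne
          | cons a l =>
              simp [pvGo, h0, List.foldl_cons, ih (topo ++ [n]) 0, hpg,
                List.getLast_cons]
        · simp [pvGo, h1, h0, List.foldl_cons, ih]

lemma pvA_eq_go (s : String) :
    get_topology_py s = pvGo s.toList 0 := by
  have hne : pvGo s.toList 0 ≠ [] := pvGo_ne_nil s.toList 0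
  simp only [get_topology_py, pvLoopA_eq]
  simpa using (List.dropLast_concat_getLast hne)

-- count.go with enough fuel counts '1' occurrences
lemma pvCountGo (fuel : Nat) (l : List Char) (acc : Nat) (h : l.length ≤ fuel) :
    PySem.Chars.count.go ['1'] fuel l acc = acc + l.count '1' := by
  induction fuel generalizing l acc with
  | zero =>
      interval_cases hl : l.length
      · simp [List.length_eq_zero_iff.mp hl, PySem.Chars.count.go]
  | succ f ih =>
      cases l with
      | nil => simp [PySem.Chars.count.go]
      | cons c cs =>
          by_cases hc : c = '1'
          · have : List.isPrefixOf ['1'] (c :: cs) = true := by simp [List.isPrefixOf, hc]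
            simp only [PySem.Chars.count.go, this, if_true]
            simp only [List.length_cons] at h
            rw [ih _ _ (by simpa using h)]
            simp [hc]
            omega
          · have : List.isPrefixOf ['1'] (c :: cs) = false := by
              simp [List.isPrefixOf]; exact fun hh => hc hh.symm
            simp only [PySem.Chars.count.go, this, Bool.false_eq_true, if_false]
            simp only [List.length_cons] at h
            rw [ih _ _ (by omega)]
            simp [hc]

lemma pvCount_eq (l : List Char) :
    PySem.Chars.count l ['1'] = l.count '1' := by
  simp [PySem.Chars.count, pvCountGo l.length l 0 le_rfl]

-- splitOn.go with enough fuel is pvSplit1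
lemma pvSplitGo (fuel : Nat) (l cur : List Char) (acc : List (List Char))
    (h : l.length ≤ fuel) :
    PySem.Chars.splitOn.go ['0'] fuel l cur acc
      = acc.reverse ++ pvSplit1 cur.reverse l := by
  induction fuel generalizing l cur acc with
  | zero =>
      interval_cases hl : l.length
      · simp [List.length_eq_zero_iff.mp hl, PySem.Chars.splitOn.go, pvSplit1]
  | succ f ih =>
      cases l with
      | nil => simp [PySem.Chars.splitOn.go, pvSplit1]
      | cons c cs =>
          simp only [List.length_cons] at h
          by_cases hc : c = '0'
          · have hp : List.isPrefixOf ['0'] (c :: cs) = true := by simp [List.isPrefixOf, hc]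
            simp only [PySem.Chars.splitOn.go, hp, if_true]
            rw [ih _ _ _ (by simpa using h)]
            simp [pvSplit1, hc]
          · have hp : List.isPrefixOf ['0'] (c :: cs) = false := by
              simp [List.isPrefixOf]; exact fun hh => hc hh.symm
            simp only [PySem.Chars.splitOn.go, hp, Bool.false_eq_true, if_false]
            rw [ih _ _ _ (by omega)]
            simp [pvSplit1, hc]

lemma pvSplitOn_eq (l : List Char) :
    PySem.Chars.splitOn l ['0'] = pvSplit1 [] l := by
  simp [PySem.Chars.splitOn, pvSplitGo (l.length + 1) l [] [] (by omega)]

-- mapping count over the split equals the forward recursion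
lemma pvMapCount (cs pre : List Char) :
    (pvSplit1 pre cs).map (fun seg => (seg.count '1' : Int))
      = pvGo cs (pre.count '1') := by
  induction cs generalizing pre with
  | nil => simp [pvSplit1, pvGo]
  | cons c cs ih =>
      by_cases h0 : c = '0'
      · have h1 : c ≠ '1' := by simp [h0]
        simpa [pvSplit1, pvGo, h0, h1] using ih []
      · by_cases h1 : c = '1'
        · have := ih (pre ++ ['1'])
          simp only [List.count_append, List.count_singleton] at this
          simpa [pvSplit1, pvGo, h0, h1, Int.add_comm] using this
        · have := ih (pre ++ [c])
          have hcnt : (pre ++ [c]).count '1' = pre.count '1' := by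
            simp [List.count_append, h1]
          rw [hcnt] at this
          simpa [pvSplit1, pvGo, h0, h1] using this

-- ===== VERDICT (by name: the statement is the Claim_ definition above) =====
theorem get_topology_py_spec : Claim_equal_get_topology_py := by
  intro s _
  unfold Spec_get_topology_py get_topology_py_alt
  rw [pvA_eq_go]
  have h0 : "0".toList = ['0'] := rfl
  have h1 : "1".toList = ['1'] := rfl
  rw [h0, h1, pvSplitOn_eq]
  simpa [pvCount_eq] using (pvMapCount s.toList []).symm
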